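-- pv_equiv track=rewrite | github.com/HuangYitian2006/cs101 | Codes/December/cf1B_Spreadsheets.py | b
-- ===== SOURCE A (Python) =====
-- def b(s): #BC23->R23C55
--     pos=0
--     while not s[pos].isdigit():
--         pos+=1
--     c=s[0:pos]
--     c1=0
--     i=1
--     while i<=len(c):
--         c1+=(ord(c[len(c)-i])-64)*(26**(i-1))
--         #c1+=26**(i-1)
--         i+=1
--     return f'R{s[pos:]}C{c1}'
-- ===== SOURCE B (Python) =====
-- def b(s):
--     # first digit position; StopIteration (like A's IndexError) if none -- outside Pre_
--     pos = next(i for i, ch in enumerate(s) if ch.isdigit())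
--     num = 0
--     for ch in s[:pos]:          # Horner's method, left to right
--         num = num * 26 + ord(ch) - 64
--     return f'R{s[pos:]}C{num}'
-- ===== Notes on version B (the rewrite author's own statement) =====
-- stated objective: simpler
-- what changed: Replaces A's right-to-left loop with explicit 26**(i-1) powers and backwards indexing by a left-to-right Horner fold (num = num*26 + ord(ch)-64) over the letter prefix, and finds the split point with a generator over enumerate instead of a manual while over indices.
import Mathlib
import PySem

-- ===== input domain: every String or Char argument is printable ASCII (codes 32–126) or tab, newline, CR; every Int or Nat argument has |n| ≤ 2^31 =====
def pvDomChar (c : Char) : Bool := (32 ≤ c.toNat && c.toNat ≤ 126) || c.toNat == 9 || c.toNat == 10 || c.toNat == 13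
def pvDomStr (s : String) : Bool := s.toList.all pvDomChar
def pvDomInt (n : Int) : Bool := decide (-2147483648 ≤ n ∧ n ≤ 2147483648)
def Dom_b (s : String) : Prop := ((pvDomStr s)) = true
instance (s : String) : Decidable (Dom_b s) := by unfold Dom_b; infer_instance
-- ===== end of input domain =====

-- B replaces A's right-to-left loop with explicit 26^(i-1) powers by a left-to-right Horner fold (simpler).

-- ===== PORT A =====
-- while not s[pos].isdigit(): pos += 1   (on [] Python raises IndexError — excluded by Pre_b)
def bFindPos : List Char → Nat → Nat
  | [], pos => pos
  | c :: rest, pos => if PySem.Chars.isdigit c then pos else bFindPos rest (pos + 1)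

-- while i <= len(c): c1 += (ord(c[len(c)-i]) - 64) * 26**(i-1); i += 1
def bSumLoop (c : List Char) (i : Nat) (c1 : Int) : Int :=
  if i ≤ c.length then
    bSumLoop c (i + 1) (c1 + ((c.getD (c.length - i) ' ').toNat - 64) * 26 ^ (i - 1))
  else c1
termination_by c.length + 1 - i

def b (s : String) : String :=
  let cs := s.toList
  let pos := bFindPos cs 0
  let c := cs.take pos                      -- s[0:pos]
  let c1 := bSumLoop c 1 0
  "R" ++ String.ofList (cs.drop pos) ++ "C" ++ PySem.Int.toStr c1   -- f'R{s[pos:]}C{c1}'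

-- ===== PORT B =====
def b_alt (s : String) : String :=
  match s.toList.findIdx? PySem.Chars.isdigit with   -- next(i for i,ch in enumerate(s) if ch.isdigit())
  | none => ""                                       -- Python raises StopIteration here — excluded by Pre_b
  | some pos =>
    let num := (s.toList.take pos).foldl (fun a ch => a * 26 + ((ch.toNat : Int) - 64)) 0
    "R" ++ String.ofList (s.toList.drop pos) ++ "C" ++ PySem.Int.toStr num

-- ===== PRECONDITION & SPEC =====
-- A raises IndexError (and B StopIteration) on strings containing no digit; those are excluded.
def Pre_b (s : String) : Prop := s.toList.any PySem.Chars.isdigit = true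
instance (s : String) : Decidable (Pre_b s) := by unfold Pre_b; infer_instance

def pvWitness_b : String := "BC23"

def Spec_b (s : String) (out : String) : Prop := out = b_alt s
instance (s : String) (out : String) : Decidable (Spec_b s out) := by unfold Spec_b; infer_instance

-- ===== CLAIM (what is proved, stated in full; the proofs are below) =====
def Claim_equal_b : Prop := ∀ (s : String), Dom_b s → Pre_b s → Spec_b s (b s)

-- ===== LEMMAS AND PROOFS =====

-- positional base-26 value of a letter list
def pvVal : List Char → Int
  | [] => 0
  | x :: xs => ((x.toNat : Int) - 64) * 26 ^ xs.length + pvVal xs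

lemma bFindPos_eq (cs : List Char) : ∀ p, bFindPos cs p = p + cs.findIdx PySem.Chars.isdigit := by
  induction cs with
  | nil => intro p; simp [bFindPos, List.findIdx_nil]
  | cons c rest ih =>
    intro p
    by_cases h : PySem.Chars.isdigit c
    · simp [bFindPos, List.findIdx_cons, h]
    · simp [bFindPos, List.findIdx_cons, h, ih]
      omega

lemma findIdx?_of_any {p : Char → Bool} (cs : List Char) (h : ∃ x ∈ cs, p x = true) :
    cs.findIdx? p = some (cs.findIdx p) := by
  induction cs with
  | nil => simp at h
  | cons c rest ih =>
    by_cases hc : p c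
    · simp [List.findIdx?_cons, List.findIdx_cons, hc]
    · simp [hc] at h
      simp [List.findIdx?_cons, List.findIdx_cons, hc, ih h]

lemma bSumLoop_cons (x : Char) (xs : List Char) :
    ∀ k i c1, xs.length + 1 - i = k → i ≤ xs.length + 1 →
      bSumLoop (x :: xs) i c1 = bSumLoop xs i c1 + ((x.toNat : Int) - 64) * 26 ^ xs.length := by
  intro k
  induction k with
  | zero =>
    intro i c1 hk hi
    have hi' : i = xs.length + 1 := by omega
    subst hi'
    rw [bSumLoop, if_pos (by simp)]
    rw [bSumLoop, if_neg (by simp)]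
    conv_rhs => rw [bSumLoop, if_neg (by omega)]
    simp [List.getD]
  | succ k ih =>
    intro i c1 hk hi
    have hi' : i ≤ xs.length := by omega
    have h1 : i ≤ (x :: xs).length := by simp; omega
    rw [bSumLoop, if_pos h1]
    have h2 : (x :: xs).length - i = (xs.length - i) + 1 := by simp; omega
    rw [h2]
    have h3 : (x :: xs).getD (xs.length - i + 1) ' ' = xs.getD (xs.length - i) ' ' := rfl
    rw [h3, ih (i + 1) _ (by omega) (by omega)]
    conv_rhs => rw [bSumLoop, if_pos hi']

lemma bSumLoop_eq_val (c : List Char) : bSumLoop c 1 0 = pvVal c := by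
  induction c with
  | nil => rw [bSumLoop]; simp [pvVal]
  | cons x xs ih =>
    rw [bSumLoop_cons x xs (xs.length + 1 - 1) 1 0 rfl (by omega), ih, pvVal]
    ring

lemma horner_eq_val (c : List Char) :
    ∀ a : Int, c.foldl (fun a ch => a * 26 + ((ch.toNat : Int) - 64)) a
      = a * 26 ^ c.length + pvVal c := by
  induction c with
  | nil => intro a; simp [pvVal]
  | cons x xs ih =>
    intro a
    simp only [List.foldl_cons, ih, pvVal, List.length_cons]
    ring

-- ===== VERDICT (by name: the statement is the Claim_ definition above) =====
theorem b_spec : Claim_equal_b := by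
  intro s _ hpre
  unfold Pre_b at hpre
  rw [List.any_eq_true] at hpre
  unfold Spec_b b b_alt
  rw [findIdx?_of_any _ hpre]
  simp only
  rw [bFindPos_eq s.toList 0, Nat.zero_add, bSumLoop_eq_val, horner_eq_val]
  simp
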